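-- pv_equiv track=rewrite | github.com/invisiblemonsters/math-lab | coffinhead/phase14_influence.py | bfs_layers
-- ===== SOURCE A (Python) =====
-- from collections import defaultdict, deque
--
-- def bfs_layers(adj, start):
--     dist = {start: 0}
--     queue = deque([start])
--     layers = defaultdict(set)
--     layers[0].add(start)
--     while queue:
--         v = queue.popleft()
--         for u in adj[v]:
--             if u not in dist:
--                 dist[u] = dist[v] + 1
--                 layers[dist[u]].add(u)
--                 queue.append(u)
--     return dict(layers), dist
-- ===== SOURCE B (Python) =====
-- def bfs_layers(adj, start):
--     # Two-phase BFS: phase 1 grows the layers as plain lists using only a 'seen'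
--     # set; phase 2 builds both dicts from the finished list of levels.
--     seen = {start}
--     levels = [[start]]
--     while levels[-1]:
--         nxt = []
--         for v in levels[-1]:
--             for u in adj[v]:
--                 if u not in seen:
--                     seen.add(u)
--                     nxt.append(u)
--         levels.append(nxt)
--     levels.pop()
--     layers = {}
--     dist = {}
--     for d, level in enumerate(levels):
--         layers[d] = set(level)
--         for v in level:
--             dist[v] = d
--     return layers, dist
-- ===== Notes on version B (the rewrite author's own statement) =====
-- stated objective: alternative
-- what changed: Replaces A's node-by-node deque loop that mutates both result dicts as it goes with a two-phase BFS: phase 1 grows a plain list of level lists using only a seen set, phase 2 builds the layers and dist dicts from the finished levels.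
import Mathlib
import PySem

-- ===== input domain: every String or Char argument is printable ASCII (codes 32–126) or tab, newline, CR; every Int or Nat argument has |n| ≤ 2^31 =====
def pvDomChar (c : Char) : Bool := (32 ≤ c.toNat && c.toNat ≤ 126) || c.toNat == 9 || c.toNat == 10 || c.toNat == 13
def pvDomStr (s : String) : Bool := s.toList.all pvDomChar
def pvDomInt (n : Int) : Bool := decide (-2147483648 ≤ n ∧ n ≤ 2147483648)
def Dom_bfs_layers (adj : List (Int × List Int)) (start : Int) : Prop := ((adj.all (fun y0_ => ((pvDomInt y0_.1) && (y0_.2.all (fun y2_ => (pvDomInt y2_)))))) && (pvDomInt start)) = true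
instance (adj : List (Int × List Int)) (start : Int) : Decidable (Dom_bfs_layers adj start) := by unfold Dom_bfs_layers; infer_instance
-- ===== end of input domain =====

-- B replaces A's node-by-node deque loop (which mutates both result dicts as it goes) by a
-- two-phase BFS: phase 1 grows a plain list of level lists using only a 'seen' set, phase 2
-- builds the layers and dist dicts from the finished levels (objective: alternative
-- decomposition, same asymptotic cost; equal return values).
-- Both Pythons raise KeyError when the traversal reaches a node that is not a key of adj;
-- those inputs are excluded by Pre_ below, and the ports use getD there (value irrelevant).
-- The while-loops are ported with a fuel argument; the fuel (number of listed neighbours + 2)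
-- is proven sufficient as part of the equivalence proof.

-- ===== PORT A =====
-- state: (dist, layers, queue), threaded through the inner for-loop exactly as Python mutates it
def pvStepA (v : Int)
    (s : PySem.Dict Int Int × PySem.Dict Int (PySem.Set Int) × List Int) (u : Int) :
    PySem.Dict Int Int × PySem.Dict Int (PySem.Set Int) × List Int :=
  if s.1.contains u then s
  else (s.1.insert u (s.1.getD v 0 + 1),
        s.2.1.insert (s.1.getD v 0 + 1)
          (PySem.Set.add (s.2.1.getD (s.1.getD v 0 + 1) PySem.Set.empty) u),
        s.2.2 ++ [u])

def pvLoopA (adjD : PySem.Dict Int (List Int)) :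
    Nat → List Int → PySem.Dict Int Int → PySem.Dict Int (PySem.Set Int) →
    (List (Int × List Int)) × (List (Int × Int))
  | 0, _, dist, layers => (layers.items, dist.items)
  | Nat.succ f, q, dist, layers =>
    match q with
    | [] => (layers.items, dist.items)
    | v :: rest =>
      let s := (adjD.getD v []).foldl (pvStepA v) (dist, layers, rest)
      pvLoopA adjD f s.2.2 s.1 s.2.1

def bfs_layers (adj : List (Int × List Int)) (start : Int) :
    (List (Int × List Int)) × (List (Int × Int)) :=
  let adjD := PySem.Dict.mk adj
  let dist : PySem.Dict Int Int := PySem.Dict.ofList [(start, 0)]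
  let layers0 : PySem.Dict Int (PySem.Set Int) := PySem.Dict.empty
  let layers := layers0.insert 0 (PySem.Set.add (layers0.getD 0 PySem.Set.empty) start)
  pvLoopA adjD ((adj.flatMap (fun p => p.2)).length + 2) [start] dist layers

-- ===== PORT B =====
-- phase 1: one discovery step over a neighbour; state is (seen set, nodes appended to nxt)
def pvEStep (s : PySem.Set Int × List Int) (u : Int) : PySem.Set Int × List Int :=
  if PySem.Set.contains s.1 u then s else (PySem.Set.add s.1 u, s.2 ++ [u])

def pvInnerE (adjD : PySem.Dict Int (List Int)) (s : PySem.Set Int × List Int) (v : Int) :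
    PySem.Set Int × List Int :=
  (adjD.getD v []).foldl pvEStep s

-- the 'while levels[-1]' loop: returns the list of (nonempty) levels, fuel-bounded
def pvLevels (adjD : PySem.Dict Int (List Int)) :
    Nat → PySem.Set Int → List Int → List (List Int)
  | 0, _, _ => []
  | Nat.succ f, seen, cur =>
    match cur with
    | [] => []
    | _ :: _ =>
      let t := cur.foldl (pvInnerE adjD) (seen, [])
      cur :: pvLevels adjD f t.1 t.2

-- phase 2: the 'for d, level in enumerate(levels)' loop building both dicts
def pvBuild : Int → PySem.Dict Int (PySem.Set Int) → PySem.Dict Int Int → List (List Int) →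
    PySem.Dict Int (PySem.Set Int) × PySem.Dict Int Int
  | _, la, di, [] => (la, di)
  | d, la, di, L :: rest =>
    pvBuild (d + 1) (la.insert d (PySem.Set.ofList L))
      (L.foldl (fun dd v => dd.insert v d) di) rest

def bfs_layers_alt (adj : List (Int × List Int)) (start : Int) :
    (List (Int × List Int)) × (List (Int × Int)) :=
  let adjD := PySem.Dict.mk adj
  let levels := pvLevels adjD ((adj.flatMap (fun p => p.2)).length + 2)
    (PySem.Set.ofList [start]) [start]
  let p := pvBuild 0 PySem.Dict.empty PySem.Dict.empty levels
  (p.1.items, p.2.items)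

-- ===== PRECONDITION & SPEC =====
-- Pre_ excludes exactly the inputs on which Python A raises KeyError: it holds iff some
-- subset S of adj's keys contains start and is closed under the listed adjacencies
-- (the set of nodes BFS reaches is then inside S, so every adj[v] lookup succeeds).
def Pre_bfs_layers (adj : List (Int × List Int)) (start : Int) : Prop :=
  ∃ S ∈ ((PySem.Dict.mk adj).keys.toFinset).powerset,
    start ∈ S ∧ ∀ v ∈ S, ∀ p ∈ adj, p.1 = v → ∀ u ∈ p.2, u ∈ S

instance (adj : List (Int × List Int)) (start : Int) : Decidable (Pre_bfs_layers adj start) := by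
  unfold Pre_bfs_layers; infer_instance

def pvWitness_bfs_layers : (List (Int × List Int)) × Int := ([(0, [1, 2]), (1, [0]), (2, [])], 0)

def Spec_bfs_layers (adj : List (Int × List Int)) (start : Int) (out : (List (Int × List Int)) × (List (Int × Int))) : Prop := out = bfs_layers_alt adj start
instance (adj : List (Int × List Int)) (start : Int) (out : (List (Int × List Int)) × (List (Int × Int))) : Decidable (Spec_bfs_layers adj start out) := by unfold Spec_bfs_layers; infer_instance

-- ===== CLAIM (what is proved, stated in full; the proofs are below) =====
def Claim_equal_bfs_layers : Prop := ∀ (adj : List (Int × List Int)) (start : Int), Dom_bfs_layers adj start → Pre_bfs_layers adj start → Spec_bfs_layers adj start (bfs_layers adj start)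

-- ===== LEMMAS AND PROOFS =====

-- proof-side intermediate: a level-synchronous variant of A's loop on the SAME dict state
def pvStepB (d : Int)
    (s : PySem.Dict Int Int × PySem.Dict Int (PySem.Set Int) × List Int) (u : Int) :
    PySem.Dict Int Int × PySem.Dict Int (PySem.Set Int) × List Int :=
  if s.1.contains u then s
  else (s.1.insert u (d + 1),
        s.2.1.insert (d + 1)
          (PySem.Set.add (s.2.1.getD (d + 1) PySem.Set.empty) u),
        s.2.2 ++ [u])

def pvInnerB (adjD : PySem.Dict Int (List Int)) (d : Int)
    (s : PySem.Dict Int Int × PySem.Dict Int (PySem.Set Int) × List Int) (v : Int) :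
    PySem.Dict Int Int × PySem.Dict Int (PySem.Set Int) × List Int :=
  (adjD.getD v []).foldl (pvStepB d) s

def pvLoopB (adjD : PySem.Dict Int (List Int)) :
    Nat → List Int → Int → PySem.Dict Int Int → PySem.Dict Int (PySem.Set Int) →
    (List (Int × List Int)) × (List (Int × Int))
  | 0, _, _, dist, layers => (layers.items, dist.items)
  | Nat.succ f, F, d, dist, layers =>
    match F with
    | [] => (layers.items, dist.items)
    | _ :: _ =>
      let t := F.foldl (pvInnerB adjD d) (dist, layers, [])
      pvLoopB adjD f t.2.2 (d + 1) t.1 t.2.1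

-- the multiset of all listed neighbours; every node BFS ever inserts (except start) is in it
def pvU (adj : List (Int × List Int)) : List Int := adj.flatMap (fun p => p.2)

-- nodes of pvU not yet in dist: the quantity that bounds the remaining work
def pvUndisc (adj : List (Int × List Int)) (dist : PySem.Dict Int Int) : Nat :=
  ((pvU adj).toFinset \ dist.keys.toFinset).card

theorem pv_mem_getD_U {adj : List (Int × List Int)} {v u : Int}
    (h : u ∈ (PySem.Dict.mk adj).getD v []) : u ∈ pvU adj := by
  rw [PySem.Dict.getD_eq_get?_getD] at h
  cases hg : (PySem.Dict.mk adj).get? v with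
  | none => rw [hg] at h; simp at h
  | some ns =>
    rw [hg] at h
    have hm : (v, ns) ∈ (PySem.Dict.mk adj).items :=
      PySem.Dict.mem_items_of_get?_eq_some _ hg
    have hm' : (v, ns) ∈ adj := hm
    exact List.mem_flatMap.mpr ⟨(v, ns), hm', h⟩

theorem pv_stepB_pres {d : Int} {s : PySem.Dict Int Int × PySem.Dict Int (PySem.Set Int) × List Int}
    {u w x : Int} (h : s.1.get? w = some x) : (pvStepB d s u).1.get? w = some x := by
  unfold pvStepB
  by_cases hc : s.1.contains u = true
  · simp [hc, h]
  · have hne : w ≠ u := by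
      intro he; subst he
      rw [PySem.Dict.contains_eq_isSome_get?, h] at hc; simp at hc
    simp only [hc, if_false, Bool.false_eq_true]
    simpa [PySem.Dict.get?_insert_of_ne _ _ hne] using h

-- the round invariant: what one layer's processing does to (dist, layers, queue)
def pvInv (adj : List (Int × List Int)) (d : Int)
    (s t : PySem.Dict Int Int × PySem.Dict Int (PySem.Set Int) × List Int) : Prop :=
  (∀ w x, s.1.get? w = some x → t.1.get? w = some x) ∧
  (s.1.keys.Nodup → t.1.keys.Nodup) ∧
  ∃ N, t.2.2 = s.2.2 ++ N ∧ N.Nodup ∧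
    (∀ u ∈ N, t.1.get? u = some (d + 1) ∧ s.1.contains u = false ∧ u ∈ pvU adj) ∧
    t.1.keys.toFinset = s.1.keys.toFinset ∪ N.toFinset

theorem pvInv_refl {adj d s} : pvInv adj d s s :=
  ⟨fun _ _ h => h, id, [], by simp, List.nodup_nil, by simp, by simp⟩

theorem pvInv_trans {adj d s m t} (h1 : pvInv adj d s m) (h2 : pvInv adj d m t) :
    pvInv adj d s t := by
  obtain ⟨p1, n1, N1, q1, nd1, pr1, k1⟩ := h1
  obtain ⟨p2, n2, N2, q2, nd2, pr2, k2⟩ := h2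
  refine ⟨fun w x h => p2 w x (p1 w x h), fun h => n2 (n1 h), N1 ++ N2, ?_, ?_, ?_, ?_⟩
  · rw [q2, q1, List.append_assoc]
  · refine List.Nodup.append nd1 nd2 ?_
    intro a ha1 ha2
    have hin : m.1.get? a = some (d + 1) := (pr1 a ha1).1
    have hout : m.1.contains a = false := (pr2 a ha2).2.1
    rw [PySem.Dict.contains_eq_isSome_get?, hin] at hout; simp at hout
  · intro u hu
    rcases List.mem_append.mp hu with h | h
    · exact ⟨p2 u _ (pr1 u h).1, (pr1 u h).2.1, (pr1 u h).2.2⟩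
    · refine ⟨(pr2 u h).1, ?_, (pr2 u h).2.2⟩
      have hmc : m.1.contains u = false := (pr2 u h).2.1
      cases hg : s.1.get? u with
      | none => rw [PySem.Dict.contains_eq_isSome_get?, hg]; rfl
      | some x =>
        have := p1 u x hg
        rw [PySem.Dict.contains_eq_isSome_get?, this] at hmc; simp at hmc
  · rw [k2, k1, List.toFinset_append, Finset.union_assoc]

theorem pvInv_stepB {adj : List (Int × List Int)} {d : Int}
    {s : PySem.Dict Int Int × PySem.Dict Int (PySem.Set Int) × List Int} {u : Int}
    (hu : u ∈ pvU adj) : pvInv adj d s (pvStepB d s u) := by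
  unfold pvStepB
  by_cases hc : s.1.contains u = true
  · simp only [hc, if_true]; exact pvInv_refl
  · simp only [hc, if_false, Bool.false_eq_true]
    refine ⟨?_, ?_, [u], rfl, List.nodup_singleton u, ?_, ?_⟩
    · intro w x h
      have hne : w ≠ u := by
        intro he; subst he
        rw [PySem.Dict.contains_eq_isSome_get?, h] at hc; simp at hc
      simpa [PySem.Dict.get?_insert_of_ne _ _ hne] using h
    · intro h; exact PySem.Dict.nodup_keys_insert _ _ _ h
    · intro w hw
      have hw' : w = u := by simpa using hw
      subst hw'
      exact ⟨PySem.Dict.get?_insert_self _ _ _, by simpa using hc, hu⟩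
    · have hnc : s.1.contains u = false := by simpa using hc
      rw [PySem.Dict.keys_insert_of_not_contains _ _ hnc]
      simp

theorem pvInv_foldB {adj : List (Int × List Int)} {d : Int} (ns : List Int) :
    ∀ s, (∀ u ∈ ns, u ∈ pvU adj) → pvInv adj d s (ns.foldl (pvStepB d) s) := by
  induction ns with
  | nil => intro s _; exact pvInv_refl
  | cons u ns ih =>
    intro s h
    exact pvInv_trans (pvInv_stepB (h u (by simp)))
      (ih _ (fun w hw => h w (by simp [hw])))

theorem pvInv_innerB {adj : List (Int × List Int)} {d : Int} {v : Int}
    (s : PySem.Dict Int Int × PySem.Dict Int (PySem.Set Int) × List Int) :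
    pvInv adj d s (pvInnerB (PySem.Dict.mk adj) d s v) :=
  pvInv_foldB _ s (fun _ hu => pv_mem_getD_U hu)

theorem pvInv_roundB {adj : List (Int × List Int)} {d : Int} (F : List Int) :
    ∀ s, pvInv adj d s (F.foldl (pvInnerB (PySem.Dict.mk adj) d) s) := by
  induction F with
  | nil => intro s; exact pvInv_refl
  | cons v F ih => intro s; exact pvInv_trans (pvInv_innerB s) (ih _)

theorem pv_stepB_shift {d : Int}
    (s : PySem.Dict Int Int × PySem.Dict Int (PySem.Set Int) × List Int)
    (q1 : List Int) (u : Int) :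
    pvStepB d (s.1, s.2.1, q1 ++ s.2.2) u =
      ((pvStepB d s u).1, (pvStepB d s u).2.1, q1 ++ (pvStepB d s u).2.2) := by
  unfold pvStepB
  by_cases hc : s.1.contains u = true
  · simp [hc]
  · simp [hc]

theorem pv_foldB_shift {d : Int} (ns : List Int) :
    ∀ (s : PySem.Dict Int Int × PySem.Dict Int (PySem.Set Int) × List Int) (q1 : List Int),
      ns.foldl (pvStepB d) (s.1, s.2.1, q1 ++ s.2.2) =
        ((ns.foldl (pvStepB d) s).1, (ns.foldl (pvStepB d) s).2.1,
          q1 ++ (ns.foldl (pvStepB d) s).2.2) := by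
  induction ns with
  | nil => intro s q1; rfl
  | cons u ns ih =>
    intro s q1
    simp only [List.foldl_cons]
    rw [pv_stepB_shift s q1 u]
    exact ih (pvStepB d s u) q1

theorem pv_stepAB {d v : Int}
    {s : PySem.Dict Int Int × PySem.Dict Int (PySem.Set Int) × List Int}
    (h : s.1.get? v = some d) (u : Int) : pvStepA v s u = pvStepB d s u := by
  have hd : s.1.getD v 0 = d := PySem.Dict.getD_of_get?_eq_some _ _ h
  unfold pvStepA pvStepB
  rw [hd]

theorem pv_foldAB {d v : Int} (ns : List Int) :
    ∀ (s : PySem.Dict Int Int × PySem.Dict Int (PySem.Set Int) × List Int),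
      s.1.get? v = some d → ns.foldl (pvStepA v) s = ns.foldl (pvStepB d) s := by
  induction ns with
  | nil => intro s _; rfl
  | cons u ns ih =>
    intro s h
    simp only [List.foldl_cons]
    rw [pv_stepAB h u]
    exact ih _ (pv_stepB_pres h)

theorem pv_foldB_pres {d w x : Int} (ns : List Int) :
    ∀ (s : PySem.Dict Int Int × PySem.Dict Int (PySem.Set Int) × List Int),
      s.1.get? w = some x → (ns.foldl (pvStepB d) s).1.get? w = some x := by
  induction ns with
  | nil => intro s h; exact h
  | cons u ns ih =>
    intro s h
    simp only [List.foldl_cons]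
    exact ih _ (pv_stepB_pres h)

theorem pv_innerB_pres {adjD : PySem.Dict Int (List Int)} {d : Int} {w x v : Int}
    {s : PySem.Dict Int Int × PySem.Dict Int (PySem.Set Int) × List Int}
    (h : s.1.get? w = some x) : (pvInnerB adjD d s v).1.get? w = some x :=
  pv_foldB_pres _ s h

theorem pvLoopA_nil {adjD : PySem.Dict Int (List Int)} (f : Nat)
    (dist : PySem.Dict Int Int) (layers : PySem.Dict Int (PySem.Set Int)) :
    pvLoopA adjD f [] dist layers = (layers.items, dist.items) := by
  cases f <;> rfl

theorem pvLoopB_nil {adjD : PySem.Dict Int (List Int)} (f : Nat) (d : Int)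
    (dist : PySem.Dict Int Int) (layers : PySem.Dict Int (PySem.Set Int)) :
    pvLoopB adjD f [] d dist layers = (layers.items, dist.items) := by
  cases f <;> rfl

theorem pvLayerStep {adjD : PySem.Dict Int (List Int)} {d : Int} (F : List Int) :
    ∀ (rest : List Int) (dist : PySem.Dict Int Int) (layers : PySem.Dict Int (PySem.Set Int))
      (f : Nat), (∀ v ∈ F, dist.get? v = some d) →
      pvLoopA adjD (F.length + f) (F ++ rest) dist layers =
        pvLoopA adjD f (F.foldl (pvInnerB adjD d) (dist, layers, rest)).2.2
          (F.foldl (pvInnerB adjD d) (dist, layers, rest)).1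
          (F.foldl (pvInnerB adjD d) (dist, layers, rest)).2.1 := by
  induction F with
  | nil => intro rest dist layers f _; simp
  | cons v F ih =>
    intro rest dist layers f hF
    have hlen : (v :: F).length + f = (F.length + f) + 1 := by simp; omega
    rw [hlen]
    show pvLoopA adjD ((F.length + f) + 1) (v :: (F ++ rest)) dist layers = _
    simp only [pvLoopA]
    have hv : dist.get? v = some d := hF v (by simp)
    rw [pv_foldAB _ _ hv]
    have hsh := pv_foldB_shift (d := d) (adjD.getD v []) (dist, layers, rest) F
    simp only at hsh
    rw [hsh]
    have hinner : (adjD.getD v []).foldl (pvStepB d) (dist, layers, rest) =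
        pvInnerB adjD d (dist, layers, rest) v := rfl
    rw [hinner]
    rw [ih _ _ _ f ?hyp]
    · simp only [List.foldl_cons]
    case hyp =>
      intro w hw
      exact pv_innerB_pres (hF w (by simp [hw]))

theorem pv_contains_false_not_mem {dist : PySem.Dict Int Int} {u : Int}
    (h : dist.contains u = false) : u ∉ dist.keys := by
  intro hm
  have := (PySem.Dict.contains_iff_mem_keys (d := dist) (k := u)).mpr hm
  rw [h] at this; cases this

theorem pvMain (adj : List (Int × List Int)) (k : Nat) :
    ∀ (F : List Int) (d : Int) (dist : PySem.Dict Int Int)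
      (layers : PySem.Dict Int (PySem.Set Int)) (fA fB : Nat),
      (∀ v ∈ F, dist.get? v = some d) → dist.keys.Nodup →
      pvUndisc adj dist ≤ k → F.length + pvUndisc adj dist ≤ fA →
      pvUndisc adj dist + 1 ≤ fB →
      pvLoopA (PySem.Dict.mk adj) fA F dist layers =
        pvLoopB (PySem.Dict.mk adj) fB F d dist layers := by
  induction k using Nat.strong_induction_on with
  | _ k ih =>
  intro F d dist layers fA fB hF hnd hk hfA hfB
  cases F with
  | nil => rw [pvLoopA_nil, pvLoopB_nil]
  | cons v F' =>
    obtain ⟨fB', rfl⟩ : ∃ fB', fB = fB' + 1 := ⟨fB - 1, by omega⟩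
    obtain ⟨f, rfl⟩ : ∃ f, fA = (v :: F').length + f := ⟨fA - (v :: F').length, by simp at hfA ⊢; omega⟩
    set t := (v :: F').foldl (pvInnerB (PySem.Dict.mk adj) d) (dist, layers, []) with ht
    have hB : pvLoopB (PySem.Dict.mk adj) (fB' + 1) (v :: F') d dist layers =
        pvLoopB (PySem.Dict.mk adj) fB' t.2.2 (d + 1) t.1 t.2.1 := rfl
    have hA := pvLayerStep (adjD := PySem.Dict.mk adj) (d := d) (v :: F')
      ([]) dist layers f hF
    rw [List.append_nil] at hA
    rw [hA, hB, ← ht]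
    obtain ⟨hpres, hndk, N, hq, hNnd, hNprop, hkeys⟩ :=
      pvInv_roundB (adj := adj) (d := d) (v :: F') (dist, layers, [])
    simp only [List.nil_append] at hq
    rw [← ht] at hpres hndk hq hNprop hkeys
    have hNU : N.toFinset ⊆ (pvU adj).toFinset \ dist.keys.toFinset := by
      intro u hu
      rw [List.mem_toFinset] at hu
      rw [Finset.mem_sdiff, List.mem_toFinset, List.mem_toFinset]
      exact ⟨(hNprop u hu).2.2, pv_contains_false_not_mem (hNprop u hu).2.1⟩
    have hcard : pvUndisc adj t.1 + N.length = pvUndisc adj dist := by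
      unfold pvUndisc
      rw [hkeys]
      have h1 : (pvU adj).toFinset \ (dist.keys.toFinset ∪ N.toFinset) =
          ((pvU adj).toFinset \ dist.keys.toFinset) \ N.toFinset := by
        ext a; simp [Finset.mem_sdiff]; tauto
      rw [h1, Finset.card_sdiff, Finset.inter_eq_left.mpr hNU,
        List.toFinset_card_of_nodup hNnd]
      have := Finset.card_le_card hNU
      rw [List.toFinset_card_of_nodup hNnd] at this
      omega
    cases hN : N with
    | nil =>
      rw [hN] at hq
      rw [hq, pvLoopA_nil, pvLoopB_nil]
    | cons n0 N' =>
      have hNlen : 1 ≤ N.length := by rw [hN]; simp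
      rw [← hN] at *
      have hrec := ih (pvUndisc adj t.1) (by omega) N (d + 1) t.1 t.2.1 f fB'
      rw [hq]
      refine hrec ?_ (hndk hnd) le_rfl ?_ ?_
      · intro u hu; exact (hNprop u hu).1
      · omega
      · omega

-- ======= correspondence between the dict round (pvStepB) and B's set round (pvEStep) =======
def pvCorr (d : Int) (dist0 : PySem.Dict Int Int) (layers0 : PySem.Dict Int (PySem.Set Int))
    (sB : PySem.Dict Int Int × PySem.Dict Int (PySem.Set Int) × List Int)
    (sE : PySem.Set Int × List Int) : Prop :=
  (∀ u : Int, PySem.Set.contains sE.1 u = sB.1.contains u) ∧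
  sE.2 = sB.2.2 ∧
  sB.1 = sB.2.2.foldl (fun dd u => dd.insert u (d + 1)) dist0 ∧
  ((sB.2.2 = [] ∧ sB.2.1 = layers0) ∨
   (sB.2.2 ≠ [] ∧ sB.2.1 = layers0.insert (d + 1) (PySem.Set.ofList sB.2.2)))

theorem pvCorr_step {d : Int} {dist0 : PySem.Dict Int Int}
    {layers0 : PySem.Dict Int (PySem.Set Int)}
    {sB : PySem.Dict Int Int × PySem.Dict Int (PySem.Set Int) × List Int}
    {sE : PySem.Set Int × List Int} (u : Int)
    (hnone : layers0.get? (d + 1) = none)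
    (h : pvCorr d dist0 layers0 sB sE) :
    pvCorr d dist0 layers0 (pvStepB d sB u) (pvEStep sE u) := by
  obtain ⟨hc, hq, hd, hl⟩ := h
  unfold pvStepB pvEStep
  rw [hc u]
  by_cases hcu : sB.1.contains u = true
  · simp only [hcu, if_true]
    exact ⟨hc, hq, hd, hl⟩
  · simp only [hcu, if_false, Bool.false_eq_true]
    refine ⟨?_, by simp [hq], ?_, ?_⟩
    · intro w
      have hmem : w ∈ PySem.Set.add sE.1 u ↔ w ∈ sE.1 ∨ w = u := PySem.Set.mem_add sE.1 u w
      rw [PySem.Dict.contains_insert]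
      cases hw : (w == u) with
      | true =>
        have : w = u := by simpa using hw
        subst this
        simp only [Bool.true_or]
        have : w ∈ PySem.Set.add sE.1 w := hmem.mpr (Or.inr rfl)
        exact (PySem.Set.contains_iff _ _).mpr this
      | false =>
        have hne : w ≠ u := by simpa using hw
        simp only [Bool.false_or]
        rw [← hc w]
        cases hcw : PySem.Set.contains sE.1 w with
        | true =>
          have : w ∈ PySem.Set.add sE.1 u :=
            hmem.mpr (Or.inl ((PySem.Set.contains_iff _ _).mp hcw))
          simpa [PySem.Set.contains_iff _ _] using this
        | false =>
          have : w ∉ PySem.Set.add sE.1 u := by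
            intro hwm
            rcases hmem.mp hwm with h' | h'
            · rw [(PySem.Set.contains_iff _ _).mpr h'] at hcw; cases hcw
            · exact hne h'
          simpa [PySem.Set.contains_iff _ _] using this
    · simp only
      rw [List.foldl_append, ← hd]
      rfl
    · right
      refine ⟨by simp, ?_⟩
      simp only
      rcases hl with ⟨hq0, hlay⟩ | ⟨hq0, hlay⟩
      · subst hlay
        rw [hq0]
        have hgd : sB.2.1.getD (d + 1) PySem.Set.empty = PySem.Set.empty := by
          rw [PySem.Dict.getD_eq_get?_getD, hnone]; rfl
        rw [hgd]
        have : PySem.Set.ofList ([] ++ [u]) = PySem.Set.add (PySem.Set.ofList []) u :=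
          PySem.Set.ofList_append_singleton [] u
        rw [this]
        rfl
      · rw [hlay]
        have hgd : (layers0.insert (d + 1) (PySem.Set.ofList sB.2.2)).getD (d + 1)
            PySem.Set.empty = PySem.Set.ofList sB.2.2 :=
          PySem.Dict.getD_insert_self _ _ _ _
        rw [hgd, PySem.Dict.insert_insert_self, ← PySem.Set.ofList_append_singleton sB.2.2 u]

theorem pvCorr_fold {d : Int} {dist0 : PySem.Dict Int Int}
    {layers0 : PySem.Dict Int (PySem.Set Int)} (ns : List Int)
    (hnone : layers0.get? (d + 1) = none) :
    ∀ sB sE, pvCorr d dist0 layers0 sB sE →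
      pvCorr d dist0 layers0 (ns.foldl (pvStepB d) sB) (ns.foldl pvEStep sE) := by
  induction ns with
  | nil => intro sB sE h; exact h
  | cons u ns ih =>
    intro sB sE h
    simp only [List.foldl_cons]
    exact ih _ _ (pvCorr_step u hnone h)

theorem pvCorr_round {adjD : PySem.Dict Int (List Int)} {d : Int}
    {dist0 : PySem.Dict Int Int} {layers0 : PySem.Dict Int (PySem.Set Int)} (F : List Int)
    (hnone : layers0.get? (d + 1) = none) :
    ∀ sB sE, pvCorr d dist0 layers0 sB sE →
      pvCorr d dist0 layers0 (F.foldl (pvInnerB adjD d) sB) (F.foldl (pvInnerE adjD) sE) := by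
  induction F with
  | nil => intro sB sE h; exact h
  | cons v F ih =>
    intro sB sE h
    simp only [List.foldl_cons]
    exact ih _ _ (pvCorr_fold _ hnone _ _ h)

theorem pvLevels_empty {adjD : PySem.Dict Int (List Int)} (f : Nat) (seen : PySem.Set Int) :
    pvLevels adjD f seen [] = [] := by
  cases f <;> rfl

-- B's loop over whole levels equals phase-1-then-phase-2 of port B
theorem pvBmain (adj : List (Int × List Int)) (k : Nat) :
    ∀ (F : List Int) (d : Int) (dist : PySem.Dict Int Int)
      (layers : PySem.Dict Int (PySem.Set Int)) (seen : PySem.Set Int) (fB fL : Nat),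
      F ≠ [] →
      (∀ u : Int, PySem.Set.contains seen u = dist.contains u) →
      dist.keys.Nodup →
      (∀ j : Int, d + 1 ≤ j → layers.get? j = none) →
      pvUndisc adj dist ≤ k →
      pvUndisc adj dist + 2 ≤ fB →
      pvUndisc adj dist + 2 ≤ fL →
      pvLoopB (PySem.Dict.mk adj) fB F d dist layers =
        ((pvBuild (d + 1) layers dist (pvLevels (PySem.Dict.mk adj) fL seen F).tail).1.items,
         (pvBuild (d + 1) layers dist (pvLevels (PySem.Dict.mk adj) fL seen F).tail).2.items) := by
  induction k using Nat.strong_induction_on with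
  | _ k ih =>
  intro F d dist layers seen fB fL hFne hcorr hnd hlnone hk hfB hfL
  cases F with
  | nil => exact absurd rfl hFne
  | cons v F' =>
    obtain ⟨fB', rfl⟩ : ∃ fB', fB = fB' + 1 := ⟨fB - 1, by omega⟩
    obtain ⟨fL', rfl⟩ : ∃ fL', fL = fL' + 1 := ⟨fL - 1, by omega⟩
    set t := (v :: F').foldl (pvInnerB (PySem.Dict.mk adj) d) (dist, layers, []) with ht
    set tE := (v :: F').foldl (pvInnerE (PySem.Dict.mk adj)) (seen, []) with htE
    have hB : pvLoopB (PySem.Dict.mk adj) (fB' + 1) (v :: F') d dist layers =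
        pvLoopB (PySem.Dict.mk adj) fB' t.2.2 (d + 1) t.1 t.2.1 := rfl
    have hL : pvLevels (PySem.Dict.mk adj) (fL' + 1) seen (v :: F') =
        (v :: F') :: pvLevels (PySem.Dict.mk adj) fL' tE.1 tE.2 := rfl
    rw [hB, hL]
    simp only [List.tail_cons]
    -- the correspondence after one round
    have hcorr0 : pvCorr d dist layers (dist, layers, []) (seen, []) :=
      ⟨hcorr, rfl, rfl, Or.inl ⟨rfl, rfl⟩⟩
    have hcr := pvCorr_round (adjD := PySem.Dict.mk adj) (v :: F')
      (hlnone (d + 1) le_rfl) _ _ hcorr0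
    rw [← ht, ← htE] at hcr
    obtain ⟨hcE, hqE, hdE, hlE⟩ := hcr
    -- the pvInv facts for measure / nodup
    obtain ⟨hpres, hndk, N, hq, hNnd, hNprop, hkeys⟩ :=
      pvInv_roundB (adj := adj) (d := d) (v :: F') (dist, layers, [])
    simp only [List.nil_append] at hq
    rw [← ht] at hpres hndk hq hNprop hkeys
    have hNU : N.toFinset ⊆ (pvU adj).toFinset \ dist.keys.toFinset := by
      intro u hu
      rw [List.mem_toFinset] at hu
      rw [Finset.mem_sdiff, List.mem_toFinset, List.mem_toFinset]
      exact ⟨(hNprop u hu).2.2, pv_contains_false_not_mem (hNprop u hu).2.1⟩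
    have hcard : pvUndisc adj t.1 + N.length = pvUndisc adj dist := by
      unfold pvUndisc
      rw [hkeys]
      have h1 : (pvU adj).toFinset \ (dist.keys.toFinset ∪ N.toFinset) =
          ((pvU adj).toFinset \ dist.keys.toFinset) \ N.toFinset := by
        ext a; simp [Finset.mem_sdiff]; tauto
      rw [h1, Finset.card_sdiff, Finset.inter_eq_left.mpr hNU,
        List.toFinset_card_of_nodup hNnd]
      have := Finset.card_le_card hNU
      rw [List.toFinset_card_of_nodup hNnd] at this
      omega
    cases hN : N with
    | nil =>
      -- empty next frontier: both sides stop with (layers, dist)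
      rw [hN] at hq
      have hdist : t.1 = dist := by rw [hdE, hq]; rfl
      have hlay : t.2.1 = layers := by
        rcases hlE with ⟨_, h⟩ | ⟨hne, _⟩
        · exact h
        · exact absurd hq hne
      rw [hq, hdist, hlay, pvLoopB_nil]
      have : tE.2 = [] := by rw [hqE, hq]
      rw [this, pvLevels_empty]
      rfl
    | cons n0 N' =>
      have hNlen : 1 ≤ N.length := by rw [hN]; simp
      have hqne : t.2.2 ≠ [] := by rw [hq, hN]; simp
      -- unfold one level of pvLevels on the nonempty next frontier
      obtain ⟨fL'', rfl⟩ : ∃ fL'', fL' = fL'' + 1 := ⟨fL' - 1, by omega⟩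
      have htE2 : tE.2 = t.2.2 := hqE
      have hlay : t.2.1 = layers.insert (d + 1) (PySem.Set.ofList t.2.2) := by
        rcases hlE with ⟨h0, _⟩ | ⟨_, h⟩
        · exact absurd h0 hqne
        · exact h
      have hLev2 : pvLevels (PySem.Dict.mk adj) (fL'' + 1) tE.1 tE.2 =
          tE.2 :: (pvLevels (PySem.Dict.mk adj) (fL'' + 1) tE.1 tE.2).tail := by
        rw [htE2, hq, hN]
        rfl
      rw [hLev2]
      have hbuild : pvBuild (d + 1) layers dist
          (tE.2 :: (pvLevels (PySem.Dict.mk adj) (fL'' + 1) tE.1 tE.2).tail) =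
          pvBuild (d + 1 + 1) (layers.insert (d + 1) (PySem.Set.ofList tE.2))
            (tE.2.foldl (fun dd u => dd.insert u (d + 1)) dist)
            (pvLevels (PySem.Dict.mk adj) (fL'' + 1) tE.1 tE.2).tail := rfl
      rw [hbuild, htE2, ← hdE, ← hlay]
      -- apply the induction hypothesis on the next round
      have hln2 : ∀ j : Int, (d + 1) + 1 ≤ j → t.2.1.get? j = none := by
        intro j hj
        rw [hlay]
        have hne : j ≠ d + 1 := by omega
        rw [PySem.Dict.get?_insert_of_ne _ _ hne]
        exact hlnone j (by omega)
      have hrec := ih (pvUndisc adj t.1) (by omega) t.2.2 (d + 1) t.1 t.2.1 tE.1 fB' (fL'' + 1)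
        hqne (fun u => hcE u) (hndk hnd) hln2 le_rfl (by omega) (by omega)
      exact hrec

-- ===== VERDICT (by name: the statement is the Claim_ definition above) =====
theorem bfs_layers_spec : Claim_equal_bfs_layers := by
  intro adj start _ _
  show bfs_layers adj start = bfs_layers_alt adj start
  show pvLoopA (PySem.Dict.mk adj) ((pvU adj).length + 2) [start]
      (PySem.Dict.ofList [(start, 0)])
      (PySem.Dict.ofList [(0, PySem.Set.ofList [start])]) =
    bfs_layers_alt adj start
  have h1 : pvUndisc adj (PySem.Dict.ofList [(start, 0)]) ≤ (pvU adj).toFinset.card :=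
    Finset.card_le_card Finset.sdiff_subset
  have h2 : (pvU adj).toFinset.card ≤ (pvU adj).length := List.toFinset_card_le _
  have hstart : (PySem.Dict.ofList [(start, (0 : Int))]).get? start = some 0 := by
    show (PySem.Dict.empty.insert start (0 : Int)).get? start = some 0
    exact PySem.Dict.get?_insert_self _ _ _
  have hnd : (PySem.Dict.ofList [(start, (0 : Int))]).keys.Nodup := by
    have hk : (PySem.Dict.ofList [(start, (0 : Int))]).keys = [start] := rfl
    rw [hk]
    exact List.nodup_singleton start
  have hAB := pvMain adj ((pvU adj).toFinset.card) [start] 0 (PySem.Dict.ofList [(start, 0)])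
      (PySem.Dict.ofList [(0, PySem.Set.ofList [start])])
      ((pvU adj).length + 2) ((pvU adj).length + 2) ?_ hnd h1 ?_ ?_
  · rw [hAB]
    have hcorr : ∀ u : Int, PySem.Set.contains (PySem.Set.ofList [start]) u =
        (PySem.Dict.ofList [(start, (0 : Int))]).contains u := by
      intro u
      rw [PySem.Dict.contains_eq_isSome_get?]
      show PySem.Set.contains (PySem.Set.ofList [start]) u =
        ((PySem.Dict.empty.insert start (0 : Int)).get? u).isSome
      by_cases hu : u = start
      · subst hu
        rw [PySem.Dict.get?_insert_self]
        have : u ∈ PySem.Set.ofList [u] := (PySem.Set.mem_ofList _ _).mpr (by simp)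
        rw [(PySem.Set.contains_iff _ _).mpr this]
        rfl
      · rw [PySem.Dict.get?_insert_of_ne _ _ hu]
        have h1 : (PySem.Dict.empty : PySem.Dict Int Int).get? u = none :=
          PySem.Dict.get?_empty _
        rw [h1]
        have : u ∉ PySem.Set.ofList [start] := by
          intro hm
          exact hu (by simpa using (PySem.Set.mem_ofList _ _).mp hm)
        simpa [PySem.Set.contains_iff _ _] using this
    have hlnone : ∀ j : Int, (0 : Int) + 1 ≤ j →
        (PySem.Dict.ofList [((0 : Int), PySem.Set.ofList [start])]).get? j = none := by
      intro j hj
      show (PySem.Dict.empty.insert (0 : Int) (PySem.Set.ofList [start])).get? j = none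
      have hne : j ≠ 0 := by omega
      rw [PySem.Dict.get?_insert_of_ne _ _ hne]
      exact PySem.Dict.get?_empty _
    have hBL := pvBmain adj ((pvU adj).toFinset.card) [start] 0
      (PySem.Dict.ofList [(start, 0)]) (PySem.Dict.ofList [(0, PySem.Set.ofList [start])])
      (PySem.Set.ofList [start]) ((pvU adj).length + 2) ((pvU adj).length + 2)
      (by simp) hcorr hnd hlnone h1 (by omega) (by omega)
    rw [hBL]
    rfl
  · intro v hv
    have hv' : v = start := by simpa using hv
    subst hv'
    exact hstart
  · simp only [List.length_cons, List.length_nil]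
    omega
  · omega
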